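-- pv_equiv track=rewrite | github.com/eFLAWS/ESGI-L2 | AlgoAvancée/exosuppp.py | onlyDoub
-- ===== SOURCE A (Python) =====
-- def onlyDoub(tab) :
--     for i in range (len(tab)) :
--         x = False
--         for j in range (len(tab)) :
--             if i != j :
--                 if tab[i] == tab[j] :
--                     x = True
--                     break
--         if x == False : return False
--     return True
-- ===== SOURCE B (Python) =====
-- def onlyDoub(tab):
--     counts = {}
--     for v in tab:
--         counts[v] = counts.get(v, 0) + 1
--     for v in tab:
--         if counts[v] < 2:
--             return False
--     return True
-- ===== Notes on version B (the rewrite author's own statement) =====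
-- stated objective: faster
-- what changed: Replaced the O(n^2) for-each-element rescan of the whole list with a single pass building a dict of occurrence counts followed by one O(n) check that every element's count is at least 2.
import Mathlib
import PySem

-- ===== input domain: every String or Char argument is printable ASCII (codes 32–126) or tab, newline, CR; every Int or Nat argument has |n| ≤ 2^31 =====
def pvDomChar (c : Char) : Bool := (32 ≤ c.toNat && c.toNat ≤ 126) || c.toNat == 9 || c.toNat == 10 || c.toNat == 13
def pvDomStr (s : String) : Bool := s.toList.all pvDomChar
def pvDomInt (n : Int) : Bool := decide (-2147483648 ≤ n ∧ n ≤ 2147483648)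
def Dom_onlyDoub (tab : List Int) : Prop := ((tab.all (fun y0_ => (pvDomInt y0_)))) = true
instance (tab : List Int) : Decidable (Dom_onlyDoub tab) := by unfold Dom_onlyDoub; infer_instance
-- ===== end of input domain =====

-- B replaces A's quadratic rescan by a dict of occurrence counts built in one pass, then a single
-- check that every element's count is at least 2 (objective: faster).

-- ===== PORT A =====
-- inner 'for j in range(len(tab))' with flag x and break: returns the final value of x
def onlyDoubInnerA (tab : List Int) (i : Nat) : List Nat → Bool
  | [] => false
  | j :: rest =>
    if i ≠ j then
      if PySem.List.pyGet? tab ((i : Int)) = PySem.List.pyGet? tab ((j : Int)) then true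
      else onlyDoubInnerA tab i rest
    else onlyDoubInnerA tab i rest

-- outer 'for i in range(len(tab))' with early 'return False'
def onlyDoubOuterA (tab : List Int) : List Nat → Bool
  | [] => true
  | i :: rest =>
    let x := onlyDoubInnerA tab i (List.range tab.length)
    if x = false then false else onlyDoubOuterA tab rest

def onlyDoub (tab : List Int) : Bool :=
  onlyDoubOuterA tab (List.range tab.length)

-- ===== PORT B =====
def onlyDoubCounts (tab : List Int) : PySem.Dict Int Int :=
  tab.foldl (fun d v => d.insert v (d.getD v 0 + 1)) PySem.Dict.empty

def onlyDoub_alt (tab : List Int) : Bool :=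
  tab.all (fun v => !decide ((onlyDoubCounts tab).getD v 0 < 2))

-- ===== PRECONDITION & SPEC =====
def Spec_onlyDoub (tab : List Int) (out : Bool) : Prop := out = onlyDoub_alt tab
instance (tab : List Int) (out : Bool) : Decidable (Spec_onlyDoub tab out) := by unfold Spec_onlyDoub; infer_instance

-- ===== CLAIM (what is proved, stated in full; the proofs are below) =====
def Claim_equal_onlyDoub : Prop := ∀ (tab : List Int), Dom_onlyDoub tab → Spec_onlyDoub tab (onlyDoub tab)

-- ===== LEMMAS AND PROOFS =====

theorem innerA_iff (tab : List Int) (i : Nat) (js : List Nat) :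
    onlyDoubInnerA tab i js = true ↔ ∃ j ∈ js, i ≠ j ∧ tab[i]? = tab[j]? := by
  induction js with
  | nil => simp [onlyDoubInnerA]
  | cons j rest ih =>
    simp only [onlyDoubInnerA]
    split_ifs with h1 h2
    · simp only [PySem.List.pyGet?_natCast] at h2
      simp only [true_iff]
      exact ⟨j, List.mem_cons_self, h1, h2⟩
    · simp only [PySem.List.pyGet?_natCast] at h2
      rw [ih]
      constructor
      · rintro ⟨x, hx, hne, he⟩
        exact ⟨x, List.mem_cons_of_mem _ hx, hne, he⟩
      · rintro ⟨x, hx, hne, he⟩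
        rcases List.mem_cons.mp hx with rfl | hx'
        · exact absurd he h2
        · exact ⟨x, hx', hne, he⟩
    · rw [ih]
      have hij : i = j := not_not.mp (fun h => h1 h)
      constructor
      · rintro ⟨x, hx, hne, he⟩
        exact ⟨x, List.mem_cons_of_mem _ hx, hne, he⟩
      · rintro ⟨x, hx, hne, he⟩
        rcases List.mem_cons.mp hx with rfl | hx'
        · exact absurd hij hne
        · exact ⟨x, hx', hne, he⟩

theorem outerA_eq_all (tab : List Int) (is : List Nat) :
    onlyDoubOuterA tab is = is.all (fun i => onlyDoubInnerA tab i (List.range tab.length)) := by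
  induction is with
  | nil => rfl
  | cons i rest ih =>
    simp only [onlyDoubOuterA, List.all_cons]
    by_cases h : onlyDoubInnerA tab i (List.range tab.length) = false <;> simp [h, ih]

theorem alt_eq_count (tab : List Int) :
    onlyDoub_alt tab = tab.all (fun v => decide (2 ≤ tab.count v)) := by
  have hc : onlyDoubCounts tab = PySem.Dict.counter tab := by
    unfold onlyDoubCounts
    exact PySem.Dict.foldl_insert_getD_add_one_eq_counter tab
  have hv : ∀ v : Int, (!decide (((tab.count v : Nat) : Int) < 2)) = decide (2 ≤ tab.count v) := by
    intro v
    rw [← decide_not, decide_eq_decide]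
    omega
  unfold onlyDoub_alt
  simp only [hc, PySem.Dict.getD_counter, hv]

-- an index has a partner elsewhere iff its value occurs at least twice
theorem exists_other_iff (tab : List Int) (i : Nat) (hi : i < tab.length) :
    (∃ j, ∃ _ : j < tab.length, j ≠ i ∧ tab[j] = tab[i]) ↔ 2 ≤ tab.count tab[i] := by
  rw [← List.duplicate_iff_two_le_count, List.duplicate_iff_exists_distinct_get]
  constructor
  · rintro ⟨j, hj, hne, heq⟩
    rcases Nat.lt_or_ge j i with h | h
    · exact ⟨⟨j, hj⟩, ⟨i, hi⟩, h, heq.symm, rfl⟩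
    · have h' : i < j := Nat.lt_of_le_of_ne h (Ne.symm hne)
      exact ⟨⟨i, hi⟩, ⟨j, hj⟩, h', rfl, heq.symm⟩
  · rintro ⟨n, m, hnm, h1, h2⟩
    by_cases hni : (n : Nat) = i
    · refine ⟨(m : Nat), m.isLt, ?_, h2.symm⟩
      intro hmi
      exact absurd (hni ▸ hmi ▸ rfl : (n : Nat) = (m : Nat)) (Nat.ne_of_lt (by exact_mod_cast hnm))
    · exact ⟨(n : Nat), n.isLt, hni, h1.symm⟩

theorem onlyDoub_spec : Claim_equal_onlyDoub := by
  intro tab _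
  unfold Spec_onlyDoub onlyDoub
  rw [alt_eq_count, outerA_eq_all]
  apply Bool.eq_iff_iff.mpr
  simp only [List.all_eq_true, List.mem_range, innerA_iff, decide_eq_true_eq]
  constructor
  · intro h v hv
    obtain ⟨i, hi, rfl⟩ := List.mem_iff_getElem.mp hv
    obtain ⟨j, hj, hne, heq⟩ := h i hi
    have hjl : j < tab.length := hj
    rw [List.getElem?_eq_getElem hi, List.getElem?_eq_getElem hjl] at heq
    have heq' : tab[i] = tab[j] := Option.some_inj.mp heq
    exact (exists_other_iff tab i hi).mp ⟨j, hjl, fun hji => hne hji.symm, heq'.symm⟩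
  · intro h i hi
    obtain ⟨j, hjl, hne, heq⟩ := (exists_other_iff tab i hi).mpr (h tab[i] (List.getElem_mem hi))
    refine ⟨j, hjl, fun hij => hne hij.symm, ?_⟩
    rw [List.getElem?_eq_getElem hi, List.getElem?_eq_getElem hjl, heq]
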